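-- pv_equiv track=rewrite | github.com/VJNAVEEN2005/Placement-Preparation | Problems/problem1.py | isCanBeSolved
-- ===== SOURCE A (Python) =====
-- def isCanBeSolved(nums):
--     arr = []
--     while nums:
--         arr.append(nums % 10)
--         nums = nums // 10
--     if arr[0] == arr[1] and arr[1] == arr[2]:
--         return 0
--
--     if arr[0] == arr[1] or arr[1] == arr[2] or arr[0] == arr[2]:
--         if arr[0] == arr[1] :
--             num1 = arr[0]
--             num2 = arr[2]
--         elif arr[1] == arr[2]:
--             num1 = arr[1]
--             num2 = arr[0]
--         else:
--             num1 = arr[0]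
--             num2 = arr[1]
--
--         count = 0
--         while num1 != num2:
--             if num1 > num2:
--                 return -1
--             else:
--                 num1 += 1
--                 num2 -= 1
--                 count += 1
--         return count
--     else:
--         return -1
-- ===== SOURCE B (Python) =====
-- def isCanBeSolved(nums):
--     d0 = nums % 10
--     d1 = nums // 10 % 10
--     d2 = nums // 100 % 10
--     if d0 == d1 == d2:
--         return 0
--     if d0 == d1:
--         a, b = d0, d2
--     elif d1 == d2:
--         a, b = d1, d0
--     elif d0 == d2:
--         a, b = d0, d1
--     else:
--         return -1
--     diff = b - a
--     return diff // 2 if diff >= 0 and diff % 2 == 0 else -1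
-- ===== Notes on version B (the rewrite author's own statement) =====
-- stated objective: simpler
-- what changed: B drops A's digit-collection loop in favour of direct %/// digit formulas and replaces A's meet-in-the-middle counting loop by the closed form (num2-num1)//2 when the difference is nonnegative and even, else -1.
-- outside the precondition, e.g. on isCanBeSolved(0): A raises IndexError, B returns 0; on isCanBeSolved(5): A raises IndexError, B returns -1; on isCanBeSolved(-7): A does not finish within the time limit, B returns -1
import Mathlib
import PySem

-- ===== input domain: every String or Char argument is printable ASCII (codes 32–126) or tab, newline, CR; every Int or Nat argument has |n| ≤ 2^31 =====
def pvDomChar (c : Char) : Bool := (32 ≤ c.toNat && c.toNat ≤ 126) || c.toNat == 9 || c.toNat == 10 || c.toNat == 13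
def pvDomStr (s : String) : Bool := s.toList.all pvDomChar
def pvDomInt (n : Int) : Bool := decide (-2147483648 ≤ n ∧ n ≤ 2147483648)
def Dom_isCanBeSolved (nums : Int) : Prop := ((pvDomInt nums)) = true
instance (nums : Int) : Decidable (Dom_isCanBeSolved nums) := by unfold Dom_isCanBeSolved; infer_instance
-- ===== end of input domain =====

-- B replaces A's meet-in-the-middle counting loop by the closed form (num2-num1)//2 when that
-- difference is nonnegative and even, else -1 (objective: simpler).


-- ===== PORT A =====
-- A's digit-extraction loop 'while nums: arr.append(nums % 10); nums //= 10'.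
-- The fuel argument only makes the recursion total in Lean; with fuel = nums.natAbs + 1 it never
-- runs out when 0 ≤ nums (on negative nums the Python loop diverges; excluded by Pre_).
def pvDigitsA (fuel : Nat) (nums : Int) : List Int :=
  match fuel with
  | 0 => []
  | fuel + 1 =>
    if nums ≠ 0 then PySem.Int.mod nums 10 :: pvDigitsA fuel (PySem.Int.floordiv nums 10)
    else []

-- A's counting loop 'while num1 != num2: …' (terminates for every start pair).
def pvCountA (num1 num2 count : Int) : Int :=
  if num1 ≠ num2 then
    if num1 > num2 then -1
    else pvCountA (num1 + 1) (num2 - 1) (count + 1)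
  else count
termination_by (num2 - num1).toNat
decreasing_by omega

def isCanBeSolved (nums : Int) : Int :=
  let arr := pvDigitsA (nums.natAbs + 1) nums
  match PySem.List.pyGet? arr 0, PySem.List.pyGet? arr 1, PySem.List.pyGet? arr 2 with
  | some a0, some a1, some a2 =>
    if a0 = a1 ∧ a1 = a2 then 0
    else if a0 = a1 ∨ a1 = a2 ∨ a0 = a2 then
      if a0 = a1 then pvCountA a0 a2 0
      else if a1 = a2 then pvCountA a1 a0 0
      else pvCountA a0 a1 0
    else -1
  | _, _, _ => 0  -- IndexError in Python (fewer than 3 digits); excluded by Pre_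

-- ===== PORT B =====
def isCanBeSolved_alt (nums : Int) : Int :=
  let d0 := PySem.Int.mod nums 10
  let d1 := PySem.Int.mod (PySem.Int.floordiv nums 10) 10
  let d2 := PySem.Int.mod (PySem.Int.floordiv nums 100) 10
  if d0 = d1 ∧ d1 = d2 then 0
  else
    let p : Option (Int × Int) :=
      if d0 = d1 then some (d0, d2)
      else if d1 = d2 then some (d1, d0)
      else if d0 = d2 then some (d0, d1)
      else none
    match p with
    | none => -1
    | some (a, b) =>
      let diff := b - a
      if 0 ≤ diff ∧ PySem.Int.mod diff 2 = 0 then PySem.Int.floordiv diff 2 else -1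

-- ===== PRECONDITION & SPEC =====
-- Pre_ excludes nums < 0 (A's extraction loop never terminates there) and 0 ≤ nums < 100
-- (arr has fewer than 3 entries, so A raises IndexError).
def Pre_isCanBeSolved (nums : Int) : Prop := 100 ≤ nums
instance (nums : Int) : Decidable (Pre_isCanBeSolved nums) := by unfold Pre_isCanBeSolved; infer_instance
def pvWitness_isCanBeSolved : Int := 112

def Spec_isCanBeSolved (nums : Int) (out : Int) : Prop := out = isCanBeSolved_alt nums
instance (nums : Int) (out : Int) : Decidable (Spec_isCanBeSolved nums out) := by unfold Spec_isCanBeSolved; infer_instance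

-- ===== CLAIM (what is proved, stated in full; the proofs are below) =====
def Claim_equal_isCanBeSolved : Prop := ∀ (nums : Int), Dom_isCanBeSolved nums → Pre_isCanBeSolved nums → Spec_isCanBeSolved nums (isCanBeSolved nums)

-- ===== LEMMAS AND PROOFS =====

-- A's counting loop computes the closed form.
theorem pvCountA_closed (num1 num2 count : Int) :
    pvCountA num1 num2 count =
      if 0 ≤ num2 - num1 ∧ (num2 - num1) % 2 = 0 then count + (num2 - num1) / 2 else -1 := by
  by_cases h : num1 = num2
  · subst h; rw [pvCountA]; simp
  · rw [pvCountA]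
    by_cases hgt : num1 > num2
    · simp [h, hgt]
    · have hlt : num1 < num2 := by omega
      simp only [h, hgt, if_neg, ne_eq, not_false_eq_true, if_pos]
      rw [pvCountA_closed (num1 + 1) (num2 - 1) (count + 1)]
      have : num2 - 1 - (num1 + 1) = num2 - num1 - 2 := by ring
      rw [this]
      split_ifs with h1 h2 h2 <;> omega
termination_by (num2 - num1).toNat
decreasing_by omega

-- The first three extracted digits of n ≥ 100 are n%10, n//10%10, n//100%10.
theorem pvDigitsA_three (fuel : Nat) (n : Int) (hf : 3 ≤ fuel) (hn : 100 ≤ n) :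
    ∃ t, pvDigitsA fuel n =
      PySem.Int.mod n 10 :: PySem.Int.mod (PySem.Int.floordiv n 10) 10 ::
      PySem.Int.mod (PySem.Int.floordiv n 100) 10 :: t := by
  obtain ⟨f, rfl⟩ : ∃ f, fuel = f + 3 := ⟨fuel - 3, by omega⟩
  have e10 : PySem.Int.floordiv n 10 = n / 10 := PySem.Int.floordiv_eq_ediv_of_pos (by omega)
  have e100 : PySem.Int.floordiv n 100 = n / 100 := PySem.Int.floordiv_eq_ediv_of_pos (by omega)
  have h1 : 10 ≤ n / 10 := by omega
  have e10' : PySem.Int.floordiv (n / 10) 10 = n / 10 / 10 :=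
    PySem.Int.floordiv_eq_ediv_of_pos (by omega)
  have h2 : 1 ≤ n / 10 / 10 := by omega
  refine ⟨pvDigitsA f (PySem.Int.floordiv (n / 10 / 10) 10), ?_⟩
  rw [pvDigitsA, if_pos (by omega), pvDigitsA, e10, if_pos (by omega), pvDigitsA, e10',
    if_pos (by omega)]
  have : n / 10 / 10 = n / 100 := by omega
  rw [this, e100]

-- A's branch-and-loop selection equals B's branch-and-closed-form selection, digitwise.
theorem pvBranches (d0 d1 d2 : Int) :
    (if d0 = d1 ∧ d1 = d2 then (0 : Int)
     else if d0 = d1 ∨ d1 = d2 ∨ d0 = d2 then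
       if d0 = d1 then pvCountA d0 d2 0
       else if d1 = d2 then pvCountA d1 d0 0
       else pvCountA d0 d1 0
     else -1)
    =
    (if d0 = d1 ∧ d1 = d2 then (0 : Int)
     else
       match (if d0 = d1 then some (d0, d2) else if d1 = d2 then some (d1, d0)
              else if d0 = d2 then some (d0, d1) else none) with
       | none => -1
       | some (a, b) =>
         if 0 ≤ b - a ∧ PySem.Int.mod (b - a) 2 = 0 then PySem.Int.floordiv (b - a) 2
         else -1) := by
  have e2 : ∀ a : Int, PySem.Int.mod a 2 = a % 2 := fun a =>
    PySem.Int.mod_eq_emod_of_pos (by omega)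
  have ed2 : ∀ a : Int, PySem.Int.floordiv a 2 = a / 2 := fun a =>
    PySem.Int.floordiv_eq_ediv_of_pos (by omega)
  by_cases h01 : d0 = d1
  · subst h01
    by_cases h12 : d0 = d2
    · subst h12; simp
    · simp [h12, pvCountA_closed]
  · by_cases h12 : d1 = d2
    · subst h12
      simp [h01, pvCountA_closed]
    · by_cases h02 : d0 = d2
      · subst h02
        simp [h01, h12, pvCountA_closed]
      · simp [h01, h12, h02]

-- ===== VERDICT (by name: the statement is the Claim_ definition above) =====
theorem isCanBeSolved_spec : Claim_equal_isCanBeSolved := by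
  intro nums _ hpre
  unfold Spec_isCanBeSolved isCanBeSolved isCanBeSolved_alt
  have hpre' : (100 : Int) ≤ nums := hpre
  obtain ⟨t, ht⟩ := pvDigitsA_three (nums.natAbs + 1) nums (by omega) hpre'
  rw [ht]
  set d0 := PySem.Int.mod nums 10
  set d1 := PySem.Int.mod (PySem.Int.floordiv nums 10) 10
  set d2 := PySem.Int.mod (PySem.Int.floordiv nums 100) 10
  have g0 : PySem.List.pyGet? (d0 :: d1 :: d2 :: t) 0 = some d0 := by
    have h : (0 : Int) ≤ (t.length : Int) + 1 + 1 := by omega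
    simp [PySem.List.pyGet?, PySem.List.pyIdx?, h]
  have g1 : PySem.List.pyGet? (d0 :: d1 :: d2 :: t) 1 = some d1 := by
    have h : (0 : Int) ≤ (t.length : Int) + 1 := by omega
    simp [PySem.List.pyGet?, PySem.List.pyIdx?, h]
  have g2 : PySem.List.pyGet? (d0 :: d1 :: d2 :: t) 2 = some d2 := by
    have h : (2 : Int) ≤ (t.length : Int) + 1 + 1 := by omega
    simp [PySem.List.pyGet?, PySem.List.pyIdx?, h]
  simp only [g0, g1, g2]
  exact pvBranches d0 d1 d2
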